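-- pv_equiv track=rewrite | github.com/liucong552-art/chonggou | usr/local/lib/vless-reality/render_table.py | split_point
-- ===== SOURCE A (Python) =====
-- import unicodedata
-- from typing import Iterable, List, Sequence
--
-- def char_width(ch: str) -> int:
--     if not ch or ch in "\n\r" or unicodedata.combining(ch):
--         return 0
--     return 2 if unicodedata.east_asian_width(ch) in ("W", "F") else 1
--
-- def take_prefix(text: str, width: int):
--     out: List[str] = []
--     used = 0
--     idx = 0
--     while idx < len(text):
--         ch = text[idx]
--         if ch == "\n":
--             idx += 1
--             break
--         w = char_width(ch)
--         if used + w > width: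
--             break
--         out.append(ch)
--         used += w
--         idx += 1
--     return "".join(out), text[idx:]
--
-- def split_point(text: str, width: int) -> int:
--     prefix, _ = take_prefix(text, width)
--     if len(prefix) == len(text):
--         return len(text)
--     for i in range(len(prefix) - 1, -1, -1):
--         ch = prefix[i]
--         prev = prefix[i - 1] if i > 0 else ""
--         if ch.isspace():
--             return i + 1
--         if ch in "/_-:@":
--             return i + 1
--         if i > 0 and prev.isdigit() and ch.isalpha():
--             return i
--     return len(prefix)
-- ===== SOURCE B (Python) =====
-- import unicodedata
--
--
-- def _char_width(ch):
--     if not ch or ch in "\n\r" or unicodedata.combining(ch):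
--         return 0
--     return 2 if unicodedata.east_asian_width(ch) in ("W", "F") else 1
--
--
-- def split_point(text: str, width: int) -> int:
--     # Single forward pass: accumulate display width, record the rightmost
--     # break position as we go; no prefix string, no backward scan.
--     used = 0
--     count = 0            # number of chars taken into the (virtual) prefix
--     last_break = None    # rightmost break position seen so far
--     prev = ""
--     overflow = False
--     for ch in text:
--         if ch == "\n":
--             overflow = True
--             break
--         w = _char_width(ch)
--         if used + w > width:
--             overflow = True
--             break
--         if ch.isspace() or ch in "/_-:@":
--             last_break = count + 1
--         elif count > 0 and prev.isdigit() and ch.isalpha():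
--             last_break = count
--         used += w
--         count += 1
--         prev = ch
--     if not overflow:
--         return len(text)
--     return last_break if last_break is not None else count
-- ===== Notes on version B (the rewrite author's own statement) =====
-- stated objective: faster
-- what changed: B replaces A's build-prefix-string-then-backward-scan by a single forward pass that accumulates display width and records the rightmost break position on the fly, never materialising the prefix string or doing a second scan.
import Mathlib
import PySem

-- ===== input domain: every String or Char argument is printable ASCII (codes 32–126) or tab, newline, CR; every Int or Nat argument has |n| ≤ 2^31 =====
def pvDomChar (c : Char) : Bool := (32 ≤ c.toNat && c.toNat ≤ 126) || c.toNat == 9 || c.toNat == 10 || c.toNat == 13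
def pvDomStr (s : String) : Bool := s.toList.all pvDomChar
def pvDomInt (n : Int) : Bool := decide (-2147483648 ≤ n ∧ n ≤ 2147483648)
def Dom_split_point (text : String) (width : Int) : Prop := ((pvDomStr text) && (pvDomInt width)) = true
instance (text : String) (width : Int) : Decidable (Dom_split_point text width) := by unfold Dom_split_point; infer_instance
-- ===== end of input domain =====

-- B does one forward pass recording the rightmost break position instead of
-- building a prefix and scanning it backwards; same results, same cost.

-- ===== PORT A =====
-- char_width: exact on Dom (printable ASCII + tab/newline/CR): no combining
-- and no East-Asian wide/fullwidth characters occur there, so the width is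
-- 0 for '\n'/'\r' and 1 otherwise.
def charWidthA (ch : Char) : Int :=
  if ch = '\n' ∨ ch = '\r' then 0 else 1

-- the while-loop of take_prefix, state (used, out); returns (prefix, rest)
def takePrefixGo (width : Int) : List Char → Int → List Char → List Char × List Char
  | [], _, out => (out, [])
  | ch :: rest, used, out =>
    if ch = '\n' then (out, rest)
    else
      if used + charWidthA ch > width then (out, ch :: rest)
      else takePrefixGo width rest (used + charWidthA ch) (out ++ [ch])

def take_prefix (text : List Char) (width : Int) : List Char × List Char :=
  takePrefixGo width text 0 []

-- the backward for-loop of split_point: argument n = i + 1 (n = 0 ⇔ loop exhausted)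
def backLoop (pfx : List Char) : Nat → Int
  | 0 => (pfx.length : Int)
  | n + 1 =>
    if PySem.Chars.isspace (pfx.getD n ' ') then ((n : Int) + 1)
    else if pfx.getD n ' ' ∈ ['/', '_', '-', ':', '@'] then ((n : Int) + 1)
    else if decide (0 < n) && PySem.Chars.isdigit (pfx.getD (n - 1) ' ') && PySem.Chars.isalpha (pfx.getD n ' ') then (n : Int)
    else backLoop pfx n

def split_point (text : String) (width : Int) : Int :=
  let p := take_prefix text.toList width
  if p.1.length = text.toList.length then (text.toList.length : Int)
  else backLoop p.1 p.1.length

-- ===== PORT B =====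
def charWidthB (ch : Char) : Int :=
  if ch = '\n' ∨ ch = '\r' then 0 else 1

-- the single forward loop of B: state (used, count, lastBreak, prev)
def splitAltGo (width : Int) (n : Nat) : List Char → Int → Nat → Option Nat → Option Char → Int
  | [], _, _, _, _ => (n : Int)                          -- no overflow: return len(text)
  | ch :: rest, used, count, lastBreak, prev =>
    if ch = '\n' then ((lastBreak.getD count : Nat) : Int)
    else
      if used + charWidthB ch > width then ((lastBreak.getD count : Nat) : Int)
      else
        let lb :=
          if PySem.Chars.isspace ch || decide (ch ∈ ['/', '_', '-', ':', '@']) then some (count + 1)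
          else if decide (0 < count) && (prev.elim false PySem.Chars.isdigit) && PySem.Chars.isalpha ch then some count
          else lastBreak
        splitAltGo width n rest (used + charWidthB ch) (count + 1) lb (some ch)

def split_point_alt (text : String) (width : Int) : Int :=
  splitAltGo width text.toList.length text.toList 0 0 none none

-- ===== PRECONDITION & SPEC =====
def Spec_split_point (text : String) (width : Int) (out : Int) : Prop := out = split_point_alt text width
instance (text : String) (width : Int) (out : Int) : Decidable (Spec_split_point text width out) := by unfold Spec_split_point; infer_instance

-- ===== CLAIM (what is proved, stated in full; the proofs are below) =====
def Claim_equal_split_point : Prop := ∀ (text : String) (width : Int), Dom_split_point text width → Spec_split_point text width (split_point text width)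

-- ===== LEMMAS AND PROOFS =====
-- break value at index i of a prefix p (none = no break condition holds there)
def brk (p : List Char) (i : Nat) : Option Nat :=
  if PySem.Chars.isspace (p.getD i ' ') then some (i + 1)
  else if p.getD i ' ' ∈ ['/', '_', '-', ':', '@'] then some (i + 1)
  else if decide (0 < i) && PySem.Chars.isdigit (p.getD (i - 1) ' ') && PySem.Chars.isalpha (p.getD i ' ') then some i
  else none

-- rightmost break among indices < k
def lastBrk (p : List Char) (k : Nat) : Option Nat :=
  (List.range k).foldl (fun lb i => match brk p i with | some v => some v | none => lb) none

theorem lastBrk_succ (p : List Char) (k : Nat) :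
    lastBrk p (k + 1) = match brk p k with | some v => some v | none => lastBrk p k := by
  simp [lastBrk, List.range_succ]

theorem backLoop_eq (p : List Char) : ∀ k : Nat, backLoop p k = (((lastBrk p k).getD p.length : Nat) : Int) := by
  intro k
  induction k with
  | zero => simp [backLoop, lastBrk]
  | succ n ih =>
    rw [lastBrk_succ]
    unfold backLoop brk
    split_ifs with h1 h2 h3 <;> simp [ih]

theorem brk_snoc_lt (out : List Char) (ch : Char) (i : Nat) (h : i < out.length) :
    brk (out ++ [ch]) i = brk out i := by
  have h1 : (out ++ [ch]).getD i ' ' = out.getD i ' ' := by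
    simp [List.getD, List.getElem?_append_left h]
  have h2 : (out ++ [ch]).getD (i - 1) ' ' = out.getD (i - 1) ' ' := by
    have : i - 1 < out.length := by omega
    simp [List.getD, List.getElem?_append_left this]
  simp only [brk, h1, h2]

theorem lastBrk_snoc (out : List Char) (ch : Char) : ∀ k, k ≤ out.length →
    lastBrk (out ++ [ch]) k = lastBrk out k := by
  intro k
  induction k with
  | zero => intro _; simp [lastBrk]
  | succ n ih =>
    intro h
    rw [lastBrk_succ, lastBrk_succ, ih (by omega), brk_snoc_lt out ch n (by omega)]

theorem prevDigit_eq (out : List Char) (ch : Char) (h : out ≠ []) :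
    (out.getLast?.elim false PySem.Chars.isdigit) =
      PySem.Chars.isdigit ((out ++ [ch]).getD (out.length - 1) ' ') := by
  cases out with
  | nil => exact absurd rfl h
  | cons a l =>
    have hget : ((a :: l) ++ [ch])[(a :: l).length - 1]? = (a :: l)[(a :: l).length - 1]? :=
      List.getElem?_append_left (by simp)
    simp only [List.getD]
    rw [hget, List.getLast?_eq_getElem?]
    simp

theorem brk_snoc_self (out : List Char) (ch : Char) :
    brk (out ++ [ch]) out.length =
      (if PySem.Chars.isspace ch || decide (ch ∈ ['/', '_', '-', ':', '@']) then some (out.length + 1)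
       else if decide (0 < out.length) && (out.getLast?.elim false PySem.Chars.isdigit) && PySem.Chars.isalpha ch then some out.length
       else none) := by
  have h1 : (out ++ [ch]).getD out.length ' ' = ch := by
    simp [List.getD]
  rw [brk, h1]
  by_cases hs : PySem.Chars.isspace ch = true
  · simp [hs]
  · by_cases hm : ch ∈ ['/', '_', '-', ':', '@']
    · simp [hs, hm]
    · simp only [hs, hm, Bool.false_eq_true, if_false, Bool.or_self, decide_false]
      rcases List.eq_nil_or_concat out with hnil | _
      · subst hnil; simp
      · have hne : out ≠ [] := by
          rintro rfl; simp_all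
        rw [prevDigit_eq out ch hne]

theorem go_eq (width : Int) (text : List Char) : ∀ rest used (out : List Char), out ++ rest = text →
    splitAltGo width text.length rest used out.length (lastBrk out out.length) out.getLast? =
      (if (takePrefixGo width rest used out).1.length = text.length then (text.length : Int)
       else backLoop (takePrefixGo width rest used out).1 (takePrefixGo width rest used out).1.length) := by
  intro rest
  induction rest with
  | nil =>
    intro used out hout
    simp at hout
    subst hout
    simp [splitAltGo, takePrefixGo]
  | cons ch rest ih =>
    intro used out hout
    have hlt : out.length < text.length := by
      subst hout; simp
    rw [splitAltGo, takePrefixGo]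
    by_cases hn : ch = '\n'
    · rw [if_pos hn, if_pos hn]
      simp only
      rw [if_neg (by omega), backLoop_eq]
    · rw [if_neg hn, if_neg hn]
      have hcw : charWidthB ch = charWidthA ch := rfl
      rw [hcw]
      by_cases hw : used + charWidthA ch > width
      · rw [if_pos hw, if_pos hw]
        simp only
        rw [if_neg (by omega), backLoop_eq]
      · rw [if_neg hw, if_neg hw]
        simp only
        have key : (if PySem.Chars.isspace ch || decide (ch ∈ ['/', '_', '-', ':', '@']) then some (out.length + 1)
              else if decide (0 < out.length) && (out.getLast?.elim false PySem.Chars.isdigit) && PySem.Chars.isalpha ch then some out.length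
              else lastBrk out out.length) = lastBrk (out ++ [ch]) (out.length + 1) := by
          rw [lastBrk_succ, brk_snoc_self, lastBrk_snoc out ch out.length (le_refl _)]
          split_ifs <;> rfl
        have hlen : out.length + 1 = (out ++ [ch]).length := by simp
        have hlast : some ch = (out ++ [ch]).getLast? := by simp
        rw [key, hlen, hlast]
        exact ih (used + charWidthA ch) (out ++ [ch]) (by simp [← hout])

-- ===== VERDICT (by name: the statement is the Claim_ definition above) =====
theorem split_point_spec : Claim_equal_split_point := by
  intro text width _
  unfold Spec_split_point split_point split_point_alt take_prefix
  have h := go_eq width text.toList text.toList 0 [] (by simp)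
  simp only [List.length_nil, List.getLast?_nil] at h
  rw [show lastBrk [] 0 = none from rfl] at h
  exact h.symm ▸ rfl
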